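-- pv_equiv track=rewrite | github.com/OuterCor3/COMB | gegege.py | generate_column_combinations
-- ===== SOURCE A (Python) =====
-- from itertools import product, combinations_with_replacement
--
-- def generate_column_combinations(rows, max_val):
--     combinations = []
--     for combo in combinations_with_replacement(range(len(rows)), max_val):
--         counts = [combo.count(i) for i in range(len(rows))]
--         formatted = [f"{count} pcs {rows[i]}" for i, count in enumerate(counts) if count > 0]
--         if sum(counts) == max_val:
--             combinations.append(" | ".join(formatted))
--     return combinations
-- ===== SOURCE B (Python) =====
-- def _extend(rows, n, i, t, counts, out):
--     if i == n:
--         if t == 0: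
--             out.append(" | ".join(
--                 f"{c} pcs {rows[j]}" for j, c in enumerate(counts) if c > 0))
--     elif i == n - 1:
--         if t >= 0:
--             _extend(rows, n, i + 1, 0, counts + [t], out)
--     else:
--         for c in range(t, -1, -1):
--             _extend(rows, n, i + 1, t - c, counts + [c], out)
--
--
-- def generate_column_combinations(rows, max_val):
--     out = []
--     _extend(rows, len(rows), 0, max_val, [], out)
--     return out
-- ===== Notes on version B (the rewrite author's own statement) =====
-- stated objective: alternative
-- what changed: Replaced the combinations_with_replacement enumeration (which re-counts every index in every combo and re-checks the sum) with a recursive stars-and-bars enumeration that builds each count vector directly, counting down at each row index to preserve the lexicographic output order.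
import Mathlib
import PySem

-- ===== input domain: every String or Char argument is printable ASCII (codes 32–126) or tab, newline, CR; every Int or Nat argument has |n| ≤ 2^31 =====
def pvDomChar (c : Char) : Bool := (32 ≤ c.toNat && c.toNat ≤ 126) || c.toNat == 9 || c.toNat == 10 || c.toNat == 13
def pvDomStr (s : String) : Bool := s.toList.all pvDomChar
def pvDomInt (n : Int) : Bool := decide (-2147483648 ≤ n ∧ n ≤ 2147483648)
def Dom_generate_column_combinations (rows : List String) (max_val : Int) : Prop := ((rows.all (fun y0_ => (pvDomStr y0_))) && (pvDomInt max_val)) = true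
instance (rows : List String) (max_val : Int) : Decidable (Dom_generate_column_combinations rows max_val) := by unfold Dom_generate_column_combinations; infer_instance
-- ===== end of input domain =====

-- B replaces the combinations_with_replacement enumeration (which re-counts every index in
-- every combo and re-checks the sum) by a recursive stars-and-bars enumeration that builds
-- each count vector directly, counting down at each row index so the output order is identical.

-- ===== PORT A =====
-- itertools.combinations_with_replacement(range(n), r), in its lexicographic yield order:
-- a combo starting at index s chooses a first element i in [s, n) and continues from i.
def pvCWR (n s r : Nat) : List (List Nat) :=
  match r with
  | 0 => [[]]
  | r' + 1 => (List.range' s (n - s)).flatMap (fun i => (pvCWR n i r').map (i :: ·))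
termination_by r

def generate_column_combinations (rows : List String) (max_val : Int) : List String :=
  -- combinations_with_replacement raises ValueError for max_val < 0 (outside Pre_)
  if max_val < 0 then []
  else
    let n := rows.length
    (pvCWR n 0 max_val.toNat).foldl (fun acc combo =>
      let counts : List Int := (List.range n).map (fun i => (combo.count i : Int))
      let formatted : List String :=
        (PySem.List.enumerate counts).filterMap (fun p =>
          if 0 < p.2 then
            some (PySem.Int.toStr p.2 ++ " pcs " ++ PySem.List.pyGetD rows p.1 "")
          else none)
      if counts.sum = max_val then acc ++ [PySem.Str.join " | " formatted] else acc) []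

-- ===== PORT B =====
-- _extend of Source B; the list argument is rows.drop i, carried as the structural measure for
-- Source B's 'i == n' / 'i == n - 1' tests (the row values themselves are read at the leaf)
def pvExtend (rows : List String) : List String → Int → List Int → List String
  | [], t, counts =>
      if t = 0 then
        [PySem.Str.join " | " ((PySem.List.enumerate counts).filterMap (fun p =>
          if 0 < p.2 then
            some (PySem.Int.toStr p.2 ++ " pcs " ++ PySem.List.pyGetD rows p.1 "")
          else none))]
      else []
  | [_], t, counts =>
      -- i == n - 1: the last row takes everything that remains
      if 0 ≤ t then pvExtend rows [] 0 (counts ++ [t]) else []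
  | _ :: rest@(_ :: _), t, counts =>
      (PySem.List.pyRange t (-1) (-1)).flatMap (fun c =>
        pvExtend rows rest (t - c) (counts ++ [c]))

def generate_column_combinations_alt (rows : List String) (max_val : Int) : List String :=
  pvExtend rows rows max_val []

-- ===== PRECONDITION & SPEC =====
-- A raises ValueError (from combinations_with_replacement) when max_val < 0.
def Pre_generate_column_combinations (rows : List String) (max_val : Int) : Prop := 0 ≤ max_val
instance (rows : List String) (max_val : Int) : Decidable (Pre_generate_column_combinations rows max_val) := by unfold Pre_generate_column_combinations; infer_instance

def pvWitness_generate_column_combinations : List String × Int := (["bolt", "nut"], 2)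

def Spec_generate_column_combinations (rows : List String) (max_val : Int) (out : List String) : Prop := out = generate_column_combinations_alt rows max_val
instance (rows : List String) (max_val : Int) (out : List String) : Decidable (Spec_generate_column_combinations rows max_val out) := by unfold Spec_generate_column_combinations; infer_instance

-- ===== CLAIM (what is proved, stated in full; the proofs are below) =====
def Claim_equal_generate_column_combinations : Prop := ∀ (rows : List String) (max_val : Int), Dom_generate_column_combinations rows max_val → Pre_generate_column_combinations rows max_val → Spec_generate_column_combinations rows max_val (generate_column_combinations rows max_val)

-- ===== LEMMAS AND PROOFS =====

-- the string Source B's leaf builds from a finished count vector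
def pvFmt (rows : List String) (cs : List Int) : String :=
  PySem.Str.join " | " ((PySem.List.enumerate cs).filterMap (fun p =>
    if 0 < p.2 then
      some (PySem.Int.toStr p.2 ++ " pcs " ++ PySem.List.pyGetD rows p.1 "")
    else none))

theorem pvFlatMap_congr {α β : Type} {l : List α} {f g : α → List β}
    (h : ∀ a ∈ l, f a = g a) : l.flatMap f = l.flatMap g := by
  induction l with
  | nil => rfl
  | cons x xs ih =>
    simp only [List.flatMap_cons]
    rw [h x (by simp), ih (fun a ha => h a (by simp [ha]))]

theorem pvCWR_mem_bound (n : Nat) : ∀ (r s : Nat) (combo : List Nat),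
    combo ∈ pvCWR n s r → ∀ x ∈ combo, s ≤ x ∧ x < n := by
  intro r
  induction r with
  | zero =>
    intro s combo hc x hx
    simp [pvCWR] at hc; subst hc; simp at hx
  | succ r ih =>
    intro s combo hc x hx
    simp only [pvCWR, List.mem_flatMap, List.mem_map] at hc
    obtain ⟨j, hj, tail, htail, rfl⟩ := hc
    rw [List.mem_range'] at hj
    rcases List.mem_cons.mp hx with rfl | hx'
    · omega
    · have := ih j tail htail x hx'
      omega

theorem pvCWR_length (n : Nat) : ∀ (r s : Nat) (combo : List Nat),
    combo ∈ pvCWR n s r → combo.length = r := by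
  intro r
  induction r with
  | zero => intro s combo hc; simp [pvCWR] at hc; subst hc; rfl
  | succ r ih =>
    intro s combo hc
    simp only [pvCWR, List.mem_flatMap, List.mem_map] at hc
    obtain ⟨j, _, tail, htail, rfl⟩ := hc
    simp [ih j tail htail]

theorem pvCWR_step (n i r : Nat) (h : i < n) :
    pvCWR n i (r + 1) = (pvCWR n i r).map (i :: ·) ++ pvCWR n (i + 1) (r + 1) := by
  conv_lhs => rw [pvCWR]
  have hn : n - i = (n - (i + 1)) + 1 := by omega
  rw [hn, List.range'_succ, List.flatMap_cons]
  congr 1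
  conv_rhs => rw [pvCWR]

-- stars-and-bars split of CWR at index i: choose the count (t - k) for i, descending
theorem pvCWR_split (n i : Nat) (h : i < n) : ∀ (t : Nat),
    pvCWR n i t = (List.range (t + 1)).flatMap (fun k =>
      (pvCWR n (i + 1) k).map (fun tail => List.replicate (t - k) i ++ tail)) := by
  intro t
  induction t with
  | zero => simp [pvCWR]
  | succ t ih =>
    rw [pvCWR_step n i t h, ih, List.map_flatMap]
    conv_rhs => rw [List.range_succ, List.flatMap_append]
    congr 1
    · refine pvFlatMap_congr (fun k hk => ?_)
      rw [List.mem_range] at hk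
      rw [List.map_map]
      refine List.map_congr_left (fun tail _ => ?_)
      simp only [Function.comp_apply]
      have : t + 1 - k = (t - k) + 1 := by omega
      rw [this, List.replicate_succ]
      rfl
    · simp

theorem pvCWR_last (n i t : Nat) (hin : i < n) (hlast : i + 1 = n) :
    pvCWR n i t = [List.replicate t i] := by
  rw [pvCWR_split n i hin t]
  have hnn : ∀ k : Nat, pvCWR n (i + 1) k = if k = 0 then [[]] else [] := by
    intro k
    match k with
    | 0 => simp [pvCWR]
    | k + 1 => simp [pvCWR, hlast]
  have : ∀ k ∈ List.range (t + 1),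
      (pvCWR n (i + 1) k).map (fun tail => List.replicate (t - k) i ++ tail) =
        if k = 0 then [List.replicate t i] else [] := by
    intro k _
    rw [hnn k]
    match k with
    | 0 => simp
    | k + 1 => simp
  rw [pvFlatMap_congr this, List.range_succ_eq_map, List.flatMap_cons]
  simp [List.flatMap_map]

-- main invariant: Source B's recursion over rows.drop-shaped fuel emits exactly the formatted
-- strings of the CWR combos over the remaining indices [i, n)
theorem pvExtend_eq (rows : List String) (n : Nat) : ∀ (rest : List String) (i t : Nat)
    (counts : List Int), i + rest.length = n →
    pvExtend rows rest (t : Int) counts =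
      (pvCWR n i t).map (fun combo => pvFmt rows
        (counts ++ (List.range' i (n - i)).map (fun j => ((combo.count j : Nat) : Int)))) := by
  intro rest
  induction rest with
  | nil =>
    intro i t counts hlen
    simp only [List.length_nil, Nat.add_zero] at hlen
    subst hlen
    match t with
    | 0 => simp [pvExtend, pvCWR, pvFmt]
    | t + 1 =>
      simp [pvExtend, pvCWR]
      omega
  | cons hd rest ih =>
    intro i t counts hlen
    have hin : i < n := by simp at hlen; omega
    have hlen' : (i + 1) + rest.length = n := by simp at hlen; omega
    cases rest with
    | nil =>
      have hlast : i + 1 = n := by simpa using hlen'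
      simp only [pvExtend]
      rw [if_pos (by positivity : (0 : Int) ≤ (t : Int))]
      rw [if_pos trivial]
      rw [pvCWR_last n i t hin hlast, List.map_singleton]
      have hrange : List.range' i (n - i) = [i] := by
        have : n - i = 1 := by omega
        simp [this]
      rw [hrange]
      simp [List.count_replicate_self, pvFmt]
    | cons hd2 rest2 =>
      simp only [pvExtend]
      rw [PySem.List.pyRange_neg_one]
      have htn : ((t : Int) - (-1)).toNat = t + 1 := by omega
      rw [htn, List.flatMap_map]
      rw [pvCWR_split n i hin t, List.map_flatMap]
      refine pvFlatMap_congr (fun k hk => ?_)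
      rw [List.mem_range] at hk
      have hsub : (t : Int) - ((t : Int) - (k : Int)) = ((k : Nat) : Int) := by ring_nf
      rw [hsub, ih (i + 1) k _ hlen', List.map_map]
      refine List.map_congr_left (fun tail htail => ?_)
      simp only [Function.comp_apply]
      congr 1
      have hrange : List.range' i (n - i) = i :: List.range' (i + 1) (n - (i + 1)) := by
        have : n - i = (n - (i + 1)) + 1 := by omega
        rw [this, List.range'_succ]
      have hci : (List.replicate (t - k) i ++ tail).count i = t - k := by
        rw [List.count_append, List.count_replicate_self,
          List.count_eq_zero.mpr (fun hmem =>
            absurd ((pvCWR_mem_bound n k (i + 1) tail htail i hmem).1) (by omega))]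
        omega
      have hrest : ∀ j ∈ List.range' (i + 1) (n - (i + 1)),
          (List.replicate (t - k) i ++ tail).count j = tail.count j := by
        intro j hj
        rw [List.mem_range'] at hj
        rw [List.count_append, List.count_replicate]
        have : ¬ (i == j) = true := by simp; omega
        simp [this]
      have hcast : ((t - k : Nat) : Int) = (t : Int) - (k : Int) := by
        have : k ≤ t := by omega
        omega
      rw [hrange, List.map_cons, hci, hcast]
      have hmapeq : (List.range' (i + 1) (n - (i + 1))).map
          (fun j => (((List.replicate (t - k) i ++ tail).count j : Nat) : Int)) =
          (List.range' (i + 1) (n - (i + 1))).map (fun j => ((tail.count j : Nat) : Int)) :=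
        List.map_congr_left (fun j hj => by rw [hrest j hj])
      rw [hmapeq]
      exact (List.append_cons counts ((t : Int) - (k : Int)) _).symm

-- A-side arithmetic: the sum of all index counts of a combo over range n is its length
theorem pvSum_indicator_zero (x : Nat) : ∀ (l : List Nat), x ∉ l →
    (l.map (fun i => if (i == x) = true then (1 : Int) else 0)).sum = 0 := by
  intro l
  induction l with
  | nil => simp
  | cons y ys ih =>
    intro hx
    have hyx : ¬ (y == x) = true := by simp; intro h; exact hx (h ▸ List.mem_cons_self)
    simp only [List.map_cons, List.sum_cons, if_neg hyx]
    rw [ih (fun h => hx (List.mem_cons_of_mem y h))]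
    simp

theorem pvSum_indicator_one (x : Nat) : ∀ (l : List Nat), l.Nodup → x ∈ l →
    (l.map (fun i => if (i == x) = true then (1 : Int) else 0)).sum = 1 := by
  intro l
  induction l with
  | nil => simp
  | cons y ys ih =>
    intro hnd hx
    rcases List.mem_cons.mp hx with rfl | hmem
    · simp only [List.map_cons, List.sum_cons]
      rw [if_pos (by simp), pvSum_indicator_zero x ys (List.nodup_cons.mp hnd).1]
      simp
    · have hyx : ¬ (y == x) = true := by
        simp; intro h; exact (List.nodup_cons.mp hnd).1 (h ▸ hmem)
      simp only [List.map_cons, List.sum_cons, if_neg hyx]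
      rw [ih (List.nodup_cons.mp hnd).2 hmem]
      simp

theorem pvSum_counts (n : Nat) : ∀ (combo : List Nat), (∀ x ∈ combo, x < n) →
    ((List.range n).map (fun i => (combo.count i : Int))).sum = combo.length := by
  intro combo
  induction combo with
  | nil => simp
  | cons x xs ih =>
    intro hb
    have hx : x < n := hb x List.mem_cons_self
    have hmap : (List.range n).map (fun i => ((x :: xs).count i : Int)) =
        (List.range n).map (fun i =>
          (xs.count i : Int) + (if (i == x) = true then (1 : Int) else 0)) := by
      refine List.map_congr_left (fun i _ => ?_)
      rw [List.count_cons]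
      rcases eq_or_ne i x with rfl | h
      · simp
      · simp [h, Ne.symm h]
    rw [hmap, List.sum_map_add, ih (fun y hy => hb y (List.mem_cons_of_mem x hy)),
      pvSum_indicator_one x (List.range n) (List.nodup_range) (List.mem_range.mpr hx)]
    simp

-- ===== VERDICT (by name: the statement is the Claim_ definition above) =====
theorem generate_column_combinations_spec : Claim_equal_generate_column_combinations := by
  intro rows max_val _hdom hpre
  unfold Spec_generate_column_combinations
  unfold generate_column_combinations generate_column_combinations_alt
  unfold Pre_generate_column_combinations at hpre
  rw [if_neg (by omega)]
  set n := rows.length with hn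
  set r := max_val.toNat with hr
  have hmv : max_val = (r : Int) := by omega
  have hB := pvExtend_eq rows n rows 0 r [] (by simp [hn])
  rw [hmv, hB]
  simp only []
  rw [PySem.List.foldl_append_ite
    (fun combo : List Nat => ((List.range n).map (fun i => ((combo.count i : Nat) : Int))).sum = (r : Int))
    (fun combo : List Nat => PySem.Str.join " | "
      (List.filterMap
        (fun p =>
          if 0 < p.2 then some (PySem.Int.toStr p.2 ++ " pcs " ++ PySem.List.pyGetD rows p.1 "") else none)
        (PySem.List.enumerate ((List.range n).map (fun i => ((combo.count i : Nat) : Int))))))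
    (pvCWR n 0 r) []]
  rw [List.filter_eq_self.mpr (fun combo hc => by
    have hb : ∀ x ∈ combo, x < n := fun x hx => (pvCWR_mem_bound n r 0 combo hc x hx).2
    have := pvSum_counts n combo hb
    rw [decide_eq_true_iff, this, pvCWR_length n r 0 combo hc])]
  rw [List.nil_append]
  refine List.map_congr_left (fun combo _ => ?_)
  unfold pvFmt
  rw [List.nil_append, Nat.sub_zero, List.range_eq_range']
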